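-- pv_equiv track=rewrite | github.com/hexycat/advent-of-code | 2020/python/09/problem2.py | construct_contiguous_list
-- ===== SOURCE A (Python) =====
-- def construct_contiguous_list(stack, target_number):
--   sum = 0
--   sub_stack = []
--   for i, number in enumerate(stack[::-1]):
--     sum += number
--     sub_stack.append(number)
--     if i < 2:
--       continue
--     if sum >= target_number:
--       break
--   return sub_stack[::-1]
-- ===== SOURCE B (Python) =====
-- def construct_contiguous_list(stack, target_number):
--     for k in range(3, len(stack) + 1):
--         suffix = stack[-k:]
--         if sum(suffix) >= target_number:
--             return suffix
--     return stack[:]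
-- ===== Notes on version B (the rewrite author's own statement) =====
-- stated objective: idiomatic
-- what changed: Replaces the reverse-enumerate running-sum accumulator (append then final reverse) with a direct search over suffix lengths: return the first slice stack[-k:] for k = 3..len(stack) whose sum reaches the target, else a copy of the whole list.
import Mathlib
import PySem

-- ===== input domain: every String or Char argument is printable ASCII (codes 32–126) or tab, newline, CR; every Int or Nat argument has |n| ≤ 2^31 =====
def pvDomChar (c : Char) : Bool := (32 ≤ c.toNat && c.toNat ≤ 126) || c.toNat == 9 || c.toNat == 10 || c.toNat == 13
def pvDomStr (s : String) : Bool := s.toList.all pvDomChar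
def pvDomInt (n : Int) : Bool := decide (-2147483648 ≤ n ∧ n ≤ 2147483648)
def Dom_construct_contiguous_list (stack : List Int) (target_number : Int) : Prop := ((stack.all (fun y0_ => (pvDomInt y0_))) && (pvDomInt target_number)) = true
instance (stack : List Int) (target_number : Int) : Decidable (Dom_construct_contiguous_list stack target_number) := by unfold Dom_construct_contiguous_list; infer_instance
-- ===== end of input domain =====

-- B builds the answer by searching suffix lengths (first k ≥ 3 with sum(stack[-k:]) ≥ target) instead of
-- A's running-sum accumulator over the reversed list; equivalence of the two is proved below.

-- ===== PORT A =====
-- the 'for i, number in enumerate(stack[::-1])' loop with its early 'break'; state: sum, sub_stack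
def aLoop (pairs : List (Int × Int)) (target_number : Int) (sum : Int) (sub_stack : List Int) : List Int :=
  match pairs with
  | [] => sub_stack
  | (i, number) :: rest =>
    let sum := sum + number
    let sub_stack := sub_stack ++ [number]
    if i < 2 then aLoop rest target_number sum sub_stack
    else if target_number ≤ sum then sub_stack
    else aLoop rest target_number sum sub_stack

def construct_contiguous_list (stack : List Int) (target_number : Int) : List Int :=
  let rev := (PySem.List.slice? stack none none (-1)).getD []          -- stack[::-1]
  let sub_stack := aLoop (PySem.List.enumerate rev) target_number 0 []
  (PySem.List.slice? sub_stack none none (-1)).getD []                 -- sub_stack[::-1]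

-- ===== PORT B =====
-- 'for k in range(3, len(stack) + 1): …' with its early 'return'
def bLoop (stack : List Int) (target_number : Int) (ks : List Int) : List Int :=
  match ks with
  | [] => PySem.List.slice stack none none                             -- stack[:]
  | k :: rest =>
    let suffix := PySem.List.slice stack (some (-k)) none              -- stack[-k:]
    if target_number ≤ suffix.sum then suffix
    else bLoop stack target_number rest

def construct_contiguous_list_alt (stack : List Int) (target_number : Int) : List Int :=
  bLoop stack target_number (PySem.List.pyRange 3 ((stack.length : Int) + 1) 1)

-- ===== PRECONDITION & SPEC =====
def Spec_construct_contiguous_list (stack : List Int) (target_number : Int) (out : List Int) : Prop := out = construct_contiguous_list_alt stack target_number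
instance (stack : List Int) (target_number : Int) (out : List Int) : Decidable (Spec_construct_contiguous_list stack target_number out) := by unfold Spec_construct_contiguous_list; infer_instance

-- ===== CLAIM (what is proved, stated in full; the proofs are below) =====
def Claim_equal_construct_contiguous_list : Prop := ∀ (stack : List Int) (target_number : Int), Dom_construct_contiguous_list stack target_number → Spec_construct_contiguous_list stack target_number (construct_contiguous_list stack target_number)

-- ===== LEMMAS AND PROOFS =====

-- A's loop, once past the first two indices, never takes the 'i < 2' branch: it is this index-free recursion.
def go (xs : List Int) (target_number : Int) (sum : Int) (sub_stack : List Int) : List Int :=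
  match xs with
  | [] => sub_stack
  | x :: rest =>
    if target_number ≤ sum + x then sub_stack ++ [x]
    else go rest target_number (sum + x) (sub_stack ++ [x])

theorem aLoop_eq_go (xs : List Int) (t : Int) : ∀ (j s : Int) (sub : List Int), 2 ≤ j →
    aLoop (PySem.List.enumerate xs j) t s sub = go xs t s sub := by
  induction xs with
  | nil => intro j s sub _; rfl
  | cons x rest ih =>
    intro j s sub hj
    simp only [PySem.List.enumerate, aLoop, go]
    have h2 : ¬ j < 2 := by omega
    simp only [h2, if_false]
    by_cases h : t ≤ s + x
    · simp [h]
    · simp only [h, if_false]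
      exact ih (j + 1) (s + x) (sub ++ [x]) (by omega)

-- B's loop from length k = m+1 onward is A's residual loop started after the first m reversed elements.
theorem bLoop_eq_go (stack : List Int) (t : Int) :
    ∀ (d m : Nat), stack.length - m = d →
    bLoop stack t (PySem.List.pyRange ((m : Int) + 1) ((stack.length : Int) + 1) 1)
      = (go (stack.reverse.drop m) t (stack.reverse.take m).sum (stack.reverse.take m)).reverse := by
  intro d
  induction d with
  | zero =>
    intro m hm
    have hlen : stack.length ≤ m := by omega
    have hdrop : stack.reverse.drop m = [] := by
      rw [List.drop_eq_nil_iff]; simpa using hlen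
    have htake : stack.reverse.take m = stack.reverse := by
      apply List.take_of_length_le; simpa using hlen
    rw [hdrop, htake]
    have hempty : PySem.List.pyRange ((m : Int) + 1) ((stack.length : Int) + 1) 1 = [] := by
      rw [PySem.List.pyRange_one]
      simp only [List.map_eq_nil_iff, List.range_eq_nil]
      omega
    rw [hempty]
    simp [bLoop, go, PySem.List.slice_none_none]
  | succ d ih =>
    intro m hm
    have hmlt : m < stack.length := by omega
    have hmlt' : m < stack.reverse.length := by simpa using hmlt
    have hcons : PySem.List.pyRange ((m : Int) + 1) ((stack.length : Int) + 1) 1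
        = ((m : Int) + 1) :: PySem.List.pyRange ((m : Int) + 1 + 1) ((stack.length : Int) + 1) 1 := by
      exact PySem.List.pyRange_one_cons (by omega)
    rw [hcons]
    have hdrop : stack.reverse.drop m = stack.reverse[m] :: stack.reverse.drop (m + 1) :=
      List.drop_eq_getElem_cons hmlt'
    have htake1 : stack.reverse.take (m + 1) = stack.reverse.take m ++ [stack.reverse[m]] := by
      rw [List.take_add_one]
      simp [List.getElem?_eq_getElem hmlt']
    have hsuffix : PySem.List.slice stack (some (-((m : Int) + 1))) none
        = (stack.reverse.take (m + 1)).reverse := by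
      have : (-((m : Int) + 1)) = -(((m + 1 : Nat) : Int)) := by push_cast; ring
      rw [this, PySem.List.slice_from_neg_natCast stack (m + 1) (by omega)]
      rw [List.take_reverse, List.reverse_reverse]
    have hsum : ((stack.reverse.take (m + 1)).reverse).sum = (stack.reverse.take m).sum + stack.reverse[m] := by
      rw [List.sum_reverse, htake1, List.sum_append]; simp
    simp only [bLoop, hsuffix, hsum, hdrop, go]
    by_cases h : t ≤ (stack.reverse.take m).sum + stack.reverse[m]
    · simp only [h, if_true, htake1]
    · simp only [h, if_false]
      have := ih (m + 1) (by omega)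
      rw [show ((m : Int) + 1 + 1) = (((m + 1 : Nat) : Int) + 1) by push_cast; ring] at *
      rw [this, htake1]
      simp [List.sum_append]

-- A's whole run equals the residual loop started after the first two reversed elements (covering short lists too).
theorem aRun_eq_go (stack : List Int) (t : Int) :
    aLoop (PySem.List.enumerate stack.reverse) t 0 []
      = go (stack.reverse.drop 2) t (stack.reverse.take 2).sum (stack.reverse.take 2) := by
  rcases hrev : stack.reverse with _ | ⟨a, _ | ⟨b, xs⟩⟩
  · rfl
  · simp [PySem.List.enumerate, aLoop, go]
  · simp only [PySem.List.enumerate, aLoop]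
    norm_num
    rw [aLoop_eq_go xs t 2 (a + b) [a, b] (by omega)]

-- ===== VERDICT (by name: the statement is the Claim_ definition above) =====
theorem construct_contiguous_list_spec : Claim_equal_construct_contiguous_list := by
  intro stack t _
  show construct_contiguous_list stack t = construct_contiguous_list_alt stack t
  unfold construct_contiguous_list construct_contiguous_list_alt
  simp only [PySem.List.slice?_none_none_neg_one, Option.getD_some]
  rw [aRun_eq_go]
  rw [show (3 : Int) = ((2 : Nat) : Int) + 1 by norm_num]
  rw [bLoop_eq_go stack t (stack.length - 2) 2 rfl]
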